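-- pv_equiv track=rewrite | github.com/alekanic/Synergy_Summer_Practice_2025 | ex02/main.py | analyze_matrix
-- ===== SOURCE A (Python) =====
-- def analyze_matrix(matrix):
--     """
--     Анализирует матрицу и находит сумму элементов главной диагонали
--     и количество положительных элементов.
--     """
--     if not matrix or not matrix[0]:
--         return 0, 0
--
--     rows = len(matrix)
--     cols = len(matrix[0])
--
--     # Сумма элементов главной диагонали
--     diagonal_sum = 0
--     min_dim = min(rows, cols)
--     for i in range(min_dim):
--         diagonal_sum += matrix[i][i]
--
--     # Количество положительных элементов
--     positive_count = 0
--     for row in matrix: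
--         for element in row:
--             if element > 0:
--                 positive_count += 1
--
--     return diagonal_sum, positive_count
-- ===== SOURCE B (Python) =====
-- def analyze_matrix(matrix):
--     """Recursive decomposition: fold the matrix row by row, carrying the row
--     index; each step takes the diagonal cell (if it exists) and the row's
--     positive count, combining with the result for the remaining rows."""
--     if not matrix or not matrix[0]:
--         return 0, 0
--     return _scan(matrix, 0, len(matrix[0]))
--
--
-- def _scan(rows, i, cols):
--     if not rows:
--         return 0, 0
--     row = rows[0]
--     ds, pc = _scan(rows[1:], i + 1, cols)
--     d = row[i] if i < cols and i < len(row) else 0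
--     return ds + d, pc + sum(1 for x in row if x > 0)
-- ===== Notes on version B (the rewrite author's own statement) =====
-- stated objective: alternative
-- what changed: A does two staged iterative passes (an index loop over range(min(rows,cols)) for the diagonal, then a nested for-loop scan counting positives); B is a recursive fold over the row list carrying the current row index, each step combining the guarded diagonal cell and the row's positive count (via a generator sum) with the recursive result for the remaining rows.
import Mathlib
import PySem

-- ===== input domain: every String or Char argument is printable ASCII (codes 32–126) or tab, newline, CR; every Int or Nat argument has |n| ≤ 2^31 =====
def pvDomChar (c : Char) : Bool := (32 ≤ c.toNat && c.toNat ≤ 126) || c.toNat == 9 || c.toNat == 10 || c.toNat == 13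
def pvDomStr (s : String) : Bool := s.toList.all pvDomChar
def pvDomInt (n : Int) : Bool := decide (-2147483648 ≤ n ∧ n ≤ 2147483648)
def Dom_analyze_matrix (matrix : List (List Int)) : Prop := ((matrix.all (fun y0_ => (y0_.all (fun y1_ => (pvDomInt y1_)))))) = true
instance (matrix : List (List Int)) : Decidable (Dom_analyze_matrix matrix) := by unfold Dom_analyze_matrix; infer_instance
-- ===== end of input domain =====

-- B replaces A's two staged iterative passes with a recursive row-list fold carrying the row index; objective: alternative decomposition (return value equivalence on Pre_).


-- ===== PORT A =====
def analyze_matrix (matrix : List (List Int)) : Int × Int :=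
  if matrix = [] ∨ matrix.headD [] = [] then (0, 0)
  else
    let rows : Nat := matrix.length
    let cols : Nat := (matrix.headD []).length
    let minDim : Nat := min rows cols
    let diagonal_sum : Int :=
      (PySem.List.pyRange 0 (minDim : Int) 1).foldl
        (fun s i => s + PySem.List.pyGetD (PySem.List.pyGetD matrix i []) i 0) 0
    let positive_count : Int :=
      matrix.foldl
        (fun c row => row.foldl (fun c el => if el > 0 then c + 1 else c) c) 0
    (diagonal_sum, positive_count)

-- ===== PORT B =====
-- recursive helper _scan(rows, i, cols) of Source B, step for step
def scan_B (rows : List (List Int)) (i : Int) (cols : Int) : Int × Int :=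
  match rows with
  | [] => (0, 0)
  | row :: rest =>
    let p := scan_B rest (i + 1) cols
    -- row[i] if i < cols and i < len(row) else 0  (index i ≥ 0 and in range here)
    let d : Int := if i < cols ∧ i < (row.length : Int) then PySem.List.pyGetD row i 0 else 0
    (p.1 + d, p.2 + (row.countP (fun x => decide (x > 0)) : Int))

def analyze_matrix_alt (matrix : List (List Int)) : Int × Int :=
  if matrix = [] ∨ matrix.headD [] = [] then (0, 0)
  else scan_B matrix 0 ((matrix.headD []).length : Int)

-- ===== PRECONDITION & SPEC =====
-- Pre_ excludes exactly the ragged matrices on which A raises IndexError: a row inside the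
-- first min(rows, len(matrix[0])) rows that is too short to hold its diagonal cell.
def Pre_analyze_matrix (matrix : List (List Int)) : Prop :=
  ∀ i < min matrix.length (matrix.headD []).length, i < (matrix.getD i []).length
instance (matrix : List (List Int)) : Decidable (Pre_analyze_matrix matrix) := by
  unfold Pre_analyze_matrix; infer_instance

def pvWitness_analyze_matrix : List (List Int) := [[1, -2], [3, 4]]

def Spec_analyze_matrix (matrix : List (List Int)) (out : Int × Int) : Prop := out = analyze_matrix_alt matrix
instance (matrix : List (List Int)) (out : Int × Int) : Decidable (Spec_analyze_matrix matrix out) := by unfold Spec_analyze_matrix; infer_instance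

-- ===== CLAIM (what is proved, stated in full; the proofs are below) =====
def Claim_equal_analyze_matrix : Prop := ∀ (matrix : List (List Int)), Dom_analyze_matrix matrix → Pre_analyze_matrix matrix → Spec_analyze_matrix matrix (analyze_matrix matrix)

-- ===== LEMMAS AND PROOFS =====

def pCount (m : List (List Int)) : Int :=
  (m.map (fun r => (r.countP (fun el => decide (el > 0)) : Int))).sum

-- diagonal as B's recursion computes it, with Nat row index
def specD (m : List (List Int)) (j : Nat) (c : Nat) : Int :=
  match m with
  | [] => 0
  | r :: rs => (if j < c ∧ j < r.length then r.getD j 0 else 0) + specD rs (j + 1) c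

lemma scan_B_eq (m : List (List Int)) (j : Nat) (c : Nat) :
    scan_B m (j : Int) (c : Int) = (specD m j c, pCount m) := by
  induction m generalizing j with
  | nil => simp [scan_B, specD, pCount]
  | cons r rs ih =>
    have hj1 : ((j : Int) + 1) = ((j + 1 : Nat) : Int) := by push_cast; ring
    simp only [scan_B, hj1, ih, specD, pCount, List.map_cons, List.sum_cons]
    by_cases h : j < c ∧ j < r.length
    · have : ((j : Int) < (c : Int) ∧ (j : Int) < (r.length : Int)) := by
        exact ⟨by exact_mod_cast h.1, by exact_mod_cast h.2⟩
      rw [if_pos this, if_pos h, PySem.List.pyGetD_natCast]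
      simp [Prod.ext_iff]; constructor <;> ring
    · have : ¬ ((j : Int) < (c : Int) ∧ (j : Int) < (r.length : Int)) := by
        intro hc; exact h ⟨by exact_mod_cast hc.1, by exact_mod_cast hc.2⟩
      rw [if_neg this, if_neg h]
      simp [Prod.ext_iff]; ring

-- under Pre_'s bound, B's guarded diagonal is the clipped Finset sum A computes
lemma specD_eq (m : List (List Int)) (c : Nat) (j : Nat)
    (h : ∀ i < m.length, i + j < c → i + j < (m.getD i []).length) :
    specD m j c = ∑ k ∈ Finset.range (min m.length (c - j)), (m.getD k []).getD (j + k) 0 := by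
  induction m generalizing j with
  | nil => simp [specD]
  | cons r rs ih =>
    have h0 := fun hc => (h 0 (by simp) (by simpa using hc))
    simp only [List.getD_cons_zero, Nat.zero_add] at h0
    have h' : ∀ i < rs.length, i + (j + 1) < c → i + (j + 1) < (rs.getD i []).length := by
      intro i hi hc
      have := h (i + 1) (by simp; omega) (by omega)
      simpa [Nat.add_assoc, Nat.add_comm 1 j] using this
    by_cases hj : j < c
    · have hlen : j < r.length := h0 hj
      have hmin : min (r :: rs).length (c - j) = min rs.length (c - (j + 1)) + 1 := by
        simp only [List.length_cons]; omega
      rw [hmin, Finset.sum_range_succ']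
      simp only [specD, if_pos (show j < c ∧ j < r.length from ⟨hj, hlen⟩),
        ih (j + 1) h', List.getD_cons_succ, List.getD_cons_zero, add_zero]
      rw [add_comm]
      congr 1
      apply Finset.sum_congr rfl
      intro k _
      congr 1
      omega
    · have hm0 : min (r :: rs).length (c - j) = 0 := by omega
      rw [hm0]
      simp only [Finset.range_zero, Finset.sum_empty, specD,
        if_neg (by omega : ¬ (j < c ∧ j < r.length))]
      have : specD rs (j + 1) c = 0 := by
        rw [ih (j + 1) h']
        have : min rs.length (c - (j + 1)) = 0 := by omega
        simp [this]
      simp [this]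

-- A's diagonal loop equals the Finset sum
lemma a_diag (m : List (List Int)) (n : Nat) :
    (PySem.List.pyRange 0 (n : Int) 1).foldl
      (fun s i => s + PySem.List.pyGetD (PySem.List.pyGetD m i []) i 0) 0
    = ∑ k ∈ Finset.range n, (m.getD k []).getD k 0 := by
  induction n with
  | zero => simp [PySem.List.pyRange_zero_nat]
  | succ n ih =>
    have : ((n : Int) + 1) = (((n + 1 : Nat)) : Int) := by push_cast; ring
    rw [← this, PySem.List.pyRange_one_succ_right (by positivity), List.foldl_append,
      List.foldl_cons, List.foldl_nil, ih, Finset.sum_range_succ]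
    simp

-- A's positive-count loop equals pCount
lemma a_count (m : List (List Int)) (c : Int) :
    m.foldl (fun c row => row.foldl (fun c el => if el > 0 then c + 1 else c) c) c
    = c + pCount m := by
  induction m generalizing c with
  | nil => simp [pCount]
  | cons r rs ih =>
    rw [List.foldl_cons, ih]
    have hr : r.foldl (fun c el => if el > 0 then c + 1 else c) c
        = c + (r.countP (fun el => decide (el > 0)) : Int) := by
      induction r generalizing c with
      | nil => simp
      | cons x xs ihx =>
        rw [List.foldl_cons]
        by_cases hx : x > 0 <;> simp [hx, ihx, List.countP_cons] <;> push_cast <;> ring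
    simp only [pCount, List.map_cons, List.sum_cons, hr]
    ring

-- ===== VERDICT (by name: the statement is the Claim_ definition above) =====
theorem analyze_matrix_spec : Claim_equal_analyze_matrix := by
  intro matrix _ hpre
  unfold Spec_analyze_matrix analyze_matrix analyze_matrix_alt
  by_cases hguard : matrix = [] ∨ matrix.headD [] = []
  · simp only [if_pos hguard]
  · simp only [if_neg hguard]
    have hB : scan_B matrix 0 ((matrix.headD []).length : Int)
        = (specD matrix 0 (matrix.headD []).length, pCount matrix) := by
      simpa using scan_B_eq matrix 0 (matrix.headD []).length
    rw [hB, a_diag, a_count,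
      specD_eq matrix (matrix.headD []).length 0 (by intro i hi hc; exact hpre i (by omega))]
    simp
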